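-- pv_equiv track=rewrite | github.com/sahan-vishwajith/My_ProjectEular_solutions | 51.py | dupli
-- ===== SOURCE A (Python) =====
-- def dupli(d):
--     d=str(d)
--     n=[]
--     for i in d:
--         if not i in n:
--             n.append(i)
--         elif i in n:
--             return int(i)
--     if len(d)==len(n):
--         return None
-- ===== SOURCE B (Python) =====
-- def dupli(d):
--     s = str(d)
--     best = None  # (index of second occurrence, char)
--     for c in dict.fromkeys(s):
--         j = s.find(c, s.find(c) + 1)
--         if j != -1 and (best is None or j < best[0]):
--             best = (j, c)
--     return int(best[1]) if best is not None else None
-- ===== Notes on version B (the rewrite author's own statement) =====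
-- stated objective: alternative
-- what changed: Replaces A's left-to-right scan with early return over a maintained seen-list by an argmin over the distinct characters: for each distinct char B computes the index of its second occurrence via two str.find calls and returns the character whose second occurrence comes first (None if no character repeats).
import Mathlib
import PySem

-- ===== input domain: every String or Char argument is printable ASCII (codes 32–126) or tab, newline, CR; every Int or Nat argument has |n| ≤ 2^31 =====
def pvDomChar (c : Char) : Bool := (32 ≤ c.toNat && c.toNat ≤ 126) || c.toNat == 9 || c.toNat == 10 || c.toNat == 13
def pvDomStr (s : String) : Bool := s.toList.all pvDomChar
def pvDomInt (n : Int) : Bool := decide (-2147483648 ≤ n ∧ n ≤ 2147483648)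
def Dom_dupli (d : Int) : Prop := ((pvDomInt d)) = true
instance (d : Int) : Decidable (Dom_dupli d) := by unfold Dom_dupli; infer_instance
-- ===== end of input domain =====

-- B replaces A's early-return scan with a maintained seen-list by an argmin over the
-- distinct characters of str(d): for each distinct char, the index of its second
-- occurrence (two str.find calls); the char whose second occurrence comes first wins.

-- ===== PORT A =====
-- for-loop over the chars of str(d), maintaining the seen list n; int(i) ported as
-- PySem.Int.ofChars? (exact: some = the int, none = ValueError, unreachable since a
-- repeated character of str(d) is always a digit)
def dupliLoopA (s : List Char) : List Char → List Char → Option Int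
  | [], n => if s.length == n.length then none else none
  | c :: rest, n =>
    if (n.contains c) = false then dupliLoopA s rest (n ++ [c])
    else if n.contains c then PySem.Int.ofChars? [c]
    else dupliLoopA s rest n

def dupli (d : Int) : Option Int :=
  let s := PySem.Int.toChars d
  dupliLoopA s s []

-- ===== PORT B =====
-- for c in dict.fromkeys(s): j = s.find(c, s.find(c) + 1); if j != -1 and
-- (best is None or j < best[0]): best = (j, c); finally int(best[1]) or None
def dupliLoopB (s : List Char) : List Char → Option (Int × Char) → Option (Int × Char)
  | [], best => best
  | c :: rest, best =>
    let j := PySem.Chars.findFrom s [c] (PySem.Chars.find s [c] + 1) none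
    match best with
    | none => if j ≠ -1 then dupliLoopB s rest (some (j, c)) else dupliLoopB s rest none
    | some (bj, bc) =>
        if j ≠ -1 ∧ j < bj then dupliLoopB s rest (some (j, c))
        else dupliLoopB s rest (some (bj, bc))

def dupli_alt (d : Int) : Option Int :=
  let s := PySem.Int.toChars d
  match dupliLoopB s (PySem.List.dedup s) none with
  | some (_, c) => PySem.Int.ofChars? [c]
  | none => none

-- ===== PRECONDITION & SPEC =====
def Spec_dupli (d : Int) (out : Option Int) : Prop := out = dupli_alt d
instance (d : Int) (out : Option Int) : Decidable (Spec_dupli d out) := by unfold Spec_dupli; infer_instance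

-- ===== CLAIM (what is proved, stated in full; the proofs are below) =====
def Claim_equal_dupli : Prop := ∀ (d : Int), Dom_dupli d → Spec_dupli d (dupli d)

-- ===== LEMMAS AND PROOFS =====

def i1 (c : Char) : List Char → Option Nat
  | [] => none
  | x :: r => if x = c then some 0 else (i1 c r).map (· + 1)

def d2 (c : Char) : List Char → Option Nat
  | [] => none
  | x :: r => if x = c then (i1 c r).map (· + 1) else (d2 c r).map (· + 1)

def fdP : List Char → List Char → Option Char
  | _, [] => none
  | p, c :: r => if p.contains c then some c else fdP (p ++ [c]) r

theorem i1_none_iff (c : Char) (l : List Char) : i1 c l = none ↔ c ∉ l := by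
  induction l with
  | nil => simp [i1]
  | cons x r ih =>
    by_cases h : x = c <;> simp [i1, h, ih] <;> tauto

theorem i1_lt_length (c : Char) (l : List Char) (k : Nat) (h : i1 c l = some k) :
    k < l.length := by
  induction l generalizing k with
  | nil => simp [i1] at h
  | cons x r ih =>
    simp only [List.length_cons]
    by_cases hx : x = c
    · simp [i1, hx] at h
      omega
    · simp only [i1, if_neg hx, Option.map_eq_some_iff] at h
      obtain ⟨m, hm, rfl⟩ := h
      have := ih m hm
      omega

theorem d2_none_of_not_mem (c : Char) (l : List Char) (h : c ∉ l) : d2 c l = none := by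
  induction l with
  | nil => rfl
  | cons x r ih =>
    rw [List.mem_cons, not_or] at h
    have hxc : ¬ x = c := fun hh => h.1 hh.symm
    simp [d2, hxc, ih h.2]

theorem d2_of_i1 (c : Char) (l : List Char) (k : Nat) (h : i1 c l = some k) :
    d2 c l = (i1 c (l.drop (k + 1))).map (· + (k + 1)) := by
  induction l generalizing k with
  | nil => simp [i1] at h
  | cons x r ih =>
    by_cases hx : x = c
    · simp only [i1, if_pos hx, Option.some.injEq] at h
      subst h
      simp [d2, hx]
    · simp only [i1, if_neg hx, Option.map_eq_some_iff] at h
      obtain ⟨m, hm, rfl⟩ := h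
      simp only [d2, if_neg hx, ih m hm, List.drop_succ_cons, Option.map_map]
      cases i1 c (r.drop (m + 1)) with
      | none => simp
      | some v =>
        simp only [Option.map_some, Option.some.injEq, Function.comp_apply]
        omega

theorem findgo_single (c : Char) (l : List Char) : ∀ (k : Nat),
    PySem.Chars.find.go [c] l k =
      match i1 c l with | some m => ((k + m : Nat) : Int) | none => -1 := by
  induction l with
  | nil => intro k; simp [PySem.Chars.find.go, i1]
  | cons x r ih =>
    intro k
    by_cases h : x = c
    · subst h
      simp [PySem.Chars.find.go, i1, List.isPrefixOf]
    · have hbeq : (c == x) = false := by simp [Ne.symm h]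
      rw [PySem.Chars.find.go]
      simp only [i1, List.isPrefixOf, hbeq, Bool.false_and, Bool.false_eq_true, if_neg h,
        if_false, ih (k + 1)]
      cases i1 c r with
      | none => simp
      | some m =>
        simp only [Option.map_some]
        push_cast
        ring

theorem find_single (c : Char) (l : List Char) :
    PySem.Chars.find l [c] =
      match i1 c l with | some m => (m : Int) | none => -1 := by
  have := findgo_single c l 0
  simpa [PySem.Chars.find] using this

theorem portJ_eq (s : List Char) (c : Char) :
    PySem.Chars.findFrom s [c] (PySem.Chars.find s [c] + 1) none =
      match d2 c s with | some m => (m : Int) | none => -1 := by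
  rcases h : i1 c s with _ | k
  · have hnm : c ∉ s := (i1_none_iff c s).mp h
    have h0 : PySem.Chars.find s [c] + 1 = ((0 : Nat) : Int) := by
      rw [find_single, h]; simp
    rw [h0, PySem.Chars.findFrom_natCast s [c] 0 (Nat.zero_le _)]
    simp [find_single, h, d2_none_of_not_mem c s hnm]
  · have hk : PySem.Chars.find s [c] + 1 = ((k + 1 : Nat) : Int) := by
      rw [find_single, h]; push_cast; ring
    have hlen : k + 1 ≤ s.length := i1_lt_length c s k h
    rw [hk, PySem.Chars.findFrom_natCast s [c] (k + 1) hlen,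
        d2_of_i1 c s k h, find_single]
    rcases i1 c (s.drop (k + 1)) with _ | m
    · norm_num
    · have hm : ((m : Int)) ≠ -1 := by omega
      simp only [Option.map_some, hm, if_neg]
      push_cast
      ring

theorem loopB_keep (s : List Char) (j0 : Nat) (c0 : Char)
    (hmin : ∀ c k, d2 c s = some k → j0 ≤ k) :
    ∀ cs, dupliLoopB s cs (some ((j0 : Int), c0)) = some ((j0 : Int), c0) := by
  intro cs
  induction cs with
  | nil => rfl
  | cons c rest ih =>
    simp only [dupliLoopB, portJ_eq]
    rcases h : d2 c s with _ | k
    · simpa using ih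
    · have hle := hmin c k h
      simpa [Nat.not_lt.mpr hle] using ih

theorem loopB_min (s : List Char) (j0 : Nat) (c0 : Char)
    (hc0 : d2 c0 s = some j0)
    (hmin : ∀ c k, c ≠ c0 → d2 c s = some k → j0 < k) :
    ∀ cs best, c0 ∈ cs →
      (best = none ∨ ∃ bk : Int, ∃ bc, best = some (bk, bc) ∧ (j0 : Int) < bk) →
      dupliLoopB s cs best = some ((j0 : Int), c0) := by
  have hle : ∀ c k, d2 c s = some k → j0 ≤ k := by
    intro c k hk
    by_cases hcc : c = c0
    · subst hcc; rw [hc0] at hk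
      simp at hk
      omega
    · exact le_of_lt (hmin c k hcc hk)
  intro cs
  induction cs with
  | nil => intro best h hb; simp at h
  | cons c rest ih =>
    intro best hmem hbest
    by_cases hcc : c = c0
    · subst hcc
      simp only [dupliLoopB, portJ_eq, hc0]
      rcases hbest with rfl | ⟨bk, bc, rfl, hlt⟩
      · have hne : ((j0 : Int) ≠ -1) := by omega
        simpa [hne] using loopB_keep s j0 c hle rest
      · have hcond : ((j0 : Int) ≠ -1 ∧ (j0 : Int) < bk) := ⟨by omega, hlt⟩
        simpa [hcond] using loopB_keep s j0 c hle rest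
    · have hmem' : c0 ∈ rest := by
        rcases List.mem_cons.mp hmem with h | h
        · exact absurd h.symm hcc
        · exact h
      simp only [dupliLoopB, portJ_eq]
      rcases h : d2 c s with _ | k
      · rcases hbest with rfl | ⟨bk, bc, rfl, hlt⟩
        · simpa using ih none hmem' (Or.inl rfl)
        · simpa using ih _ hmem' (Or.inr ⟨bk, bc, rfl, hlt⟩)
      · have hj0k : j0 < k := hmin c k hcc h
        rcases hbest with rfl | ⟨bk, bc, rfl, hlt⟩
        · have hne : ((k : Int) ≠ -1) := by omega
          simpa [hne] using ih _ hmem' (Or.inr ⟨k, c, rfl, by exact_mod_cast hj0k⟩)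
        · by_cases hkb : ((k : Int) < bk)
          · simpa [hkb] using ih _ hmem' (Or.inr ⟨k, c, rfl, by exact_mod_cast hj0k⟩)
          · simpa [hkb] using ih _ hmem' (Or.inr ⟨bk, bc, rfl, hlt⟩)

theorem loopB_none (s : List Char) (hall : ∀ c, d2 c s = none) :
    ∀ cs, dupliLoopB s cs none = none := by
  intro cs
  induction cs with
  | nil => rfl
  | cons c rest ih =>
    simp only [dupliLoopB, portJ_eq, hall c]
    simpa using ih

theorem d2_none_of_nodup (c : Char) (p : List Char) (hp : p.Nodup) : d2 c p = none := by
  induction p with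
  | nil => rfl
  | cons x r ih =>
    rcases List.nodup_cons.mp hp with ⟨hx, hr⟩
    by_cases h : x = c
    · subst h
      simp [d2, (i1_none_iff x r).mpr hx]
    · simp [d2, h, ih hr]

theorem i1_append_not_mem (c : Char) (p l : List Char) (h : c ∉ p) :
    i1 c (p ++ l) = (i1 c l).map (· + p.length) := by
  induction p with
  | nil => simp
  | cons x r ih =>
    rw [List.mem_cons, not_or] at h
    have hxc : ¬ x = c := fun hh => h.1 hh.symm
    simp only [List.cons_append, i1, if_neg hxc, ih h.2, Option.map_map]
    cases i1 c l with
    | none => simp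
    | some v =>
      simp only [Option.map_some, Option.some.injEq, Function.comp_apply, List.length_cons]
      omega

theorem d2_push (c : Char) (p r : List Char) (hp : p.Nodup) (hc : c ∈ p) :
    d2 c (p ++ c :: r) = some p.length := by
  induction p with
  | nil => simp at hc
  | cons x p' ih =>
    rcases List.nodup_cons.mp hp with ⟨hx, hp'⟩
    by_cases h : x = c
    · subst h
      simp only [List.cons_append, d2, if_pos rfl, i1_append_not_mem x p' (x :: r) hx]
      simp [i1]
    · have hc' : c ∈ p' := by
        rcases List.mem_cons.mp hc with hh | hh
        · exact absurd hh.symm h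
        · exact hh
      simp [d2, h, ih hp' hc']

theorem d2_gt (c x : Char) (p r : List Char) (k : Nat) (hp : p.Nodup) (hne : c ≠ x)
    (h : d2 c (p ++ x :: r) = some k) : p.length < k := by
  induction p generalizing k with
  | nil =>
    have hxc : ¬ x = c := fun hh => hne hh.symm
    simp only [List.nil_append, d2, if_neg hxc, Option.map_eq_some_iff] at h
    obtain ⟨m, hm, rfl⟩ := h
    simp
  | cons y p' ih =>
    rcases List.nodup_cons.mp hp with ⟨hy, hp'⟩
    by_cases hyc : y = c
    · subst hyc
      simp only [List.cons_append, d2, if_pos rfl, i1_append_not_mem y p' (x :: r) hy] at h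
      have hxy : ¬ x = y := fun hh => hne (hh.symm)
      simp only [i1, if_neg hxy, Option.map_map] at h
      cases hi : i1 y r with
      | none => rw [hi] at h; simp at h
      | some m =>
        rw [hi] at h
        simp at h
        simp only [List.length_cons]
        omega
    · simp only [List.cons_append, d2, if_neg hyc, Option.map_eq_some_iff] at h
      obtain ⟨m, hm, rfl⟩ := h
      have := ih m hp' hm
      simp only [List.length_cons]
      omega

theorem fdP_char : ∀ (r p : List Char), p.Nodup →
    (fdP p r = none ∧ ∀ c, d2 c (p ++ r) = none) ∨
    (∃ c0 j0, fdP p r = some c0 ∧ c0 ∈ p ++ r ∧ d2 c0 (p ++ r) = some j0 ∧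
      ∀ c k, c ≠ c0 → d2 c (p ++ r) = some k → j0 < k) := by
  intro r
  induction r with
  | nil =>
    intro p hp
    exact Or.inl ⟨rfl, fun c => by simpa using d2_none_of_nodup c p hp⟩
  | cons c r' ih =>
    intro p hp
    by_cases hc : c ∈ p
    · refine Or.inr ⟨c, p.length, ?_, by simp, d2_push c p r' hp hc, ?_⟩
      · simp [fdP, hc]
      · intro c' k hne hk
        exact d2_gt c' c p r' k hp hne hk
    · have hp' : (p ++ [c]).Nodup := by
        simp [List.nodup_append, hp]
        intro a ha hac
        exact hc (hac ▸ ha)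
      have := ih (p ++ [c]) hp'
      rw [List.append_assoc, List.singleton_append] at this
      rcases this with ⟨h1, h2⟩ | ⟨c0, j0, h1, h2, h3, h4⟩
      · exact Or.inl ⟨by simp [fdP, hc, h1], h2⟩
      · exact Or.inr ⟨c0, j0, by simp [fdP, hc, h1], h2, h3, h4⟩

theorem loopA_eq_fdP (s : List Char) : ∀ (rest p n : List Char),
    (∀ c, n.contains c = p.contains c) →
    dupliLoopA s rest n =
      (match fdP p rest with | some c => PySem.Int.ofChars? [c] | none => none) := by
  intro rest
  induction rest with
  | nil => intro p n _; simp [dupliLoopA, fdP, ite_self]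
  | cons c r ih =>
    intro p n hmem
    simp only [dupliLoopA, fdP, hmem c]
    cases h : p.contains c with
    | true => simp
    | false =>
      simp only [Bool.false_eq_true, if_false, if_true, Bool.not_false]
      have hm : ∀ x, (n ++ [c]).contains x = (p ++ [c]).contains x := by
        intro x
        simp only [List.contains_append, hmem x]
      simpa using ih (p ++ [c]) (n ++ [c]) hm

-- ===== VERDICT (by name: the statement is the Claim_ definition above) =====
theorem dupli_spec : Claim_equal_dupli := by
  intro d _
  unfold Spec_dupli dupli dupli_alt
  simp only []
  have hA := loopA_eq_fdP (PySem.Int.toChars d) (PySem.Int.toChars d) [] []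
    (by intro c; rfl)
  rcases fdP_char (PySem.Int.toChars d) [] List.nodup_nil with ⟨h1, h2⟩ | ⟨c0, j0, h1, h2, h3, h4⟩
  · rw [hA, h1]
    rw [loopB_none (PySem.Int.toChars d) (fun c => by simpa using h2 c) _]
  · rw [hA, h1]
    simp only [List.nil_append] at h2 h3 h4
    rw [loopB_min (PySem.Int.toChars d) j0 c0 h3 h4 _ none
      (by rw [PySem.List.dedup_eq_ofList]; exact (PySem.Set.mem_ofList _ _).mpr h2)
      (Or.inl rfl)]
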